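-- pv_equiv track=rewrite | github.com/samyama-ai/clinicaltrials-kg | nsclc/workflows.py | _egfr_drug_hits
-- ===== SOURCE A (Python) =====
-- from typing import Any, Iterable
--
-- def _intervention_names(record: dict[str, Any]) -> list[str]:
--     return [
--         (iv.get("name") or "")
--         for iv in record.get("interventions") or []
--         if iv.get("name")
--     ]
--
-- def _drug_names(record: dict[str, Any]) -> list[str]:
--     return [
--         (d.get("name") or "")
--         for d in record.get("drugs") or []
--         if d.get("name")
--     ]
--
-- def _all_treatment_names(record: dict[str, Any]) -> list[str]:
--     """Drug + intervention names, case preserved, deduplicated."""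
--     seen: set[str] = set()
--     out: list[str] = []
--     for name in _drug_names(record) + _intervention_names(record):
--         low = name.lower()
--         if low and low not in seen:
--             seen.add(low)
--             out.append(name)
--     return out
--
-- def _egfr_drug_hits(
--     rec: dict[str, Any], drug_list_lower: list[str]
-- ) -> list[str]:
--     """Return the EGFR drugs (from the configured list) found in this trial."""
--     names = [n.lower() for n in _all_treatment_names(rec)]
--     hits: list[str] = []
--     for drug in drug_list_lower:
--         if any(drug in n for n in names):
--             hits.append(drug)
--     return hits
-- ===== SOURCE B (Python) =====
-- def _egfr_drug_hits(rec, drug_list_lower):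
--     """Single scan over the raw treatment names, marking each drug the first
--     time it matches, then emit hits in drug_list_lower order. No dedup pass
--     and no intermediate lowered-name list."""
--     found = set()
--     for src in (rec.get("drugs") or [], rec.get("interventions") or []):
--         for d in src:
--             name = d.get("name")
--             if not name:
--                 continue
--             low = name.lower()
--             for drug in drug_list_lower:
--                 if drug not in found and drug in low:
--                     found.add(drug)
--     return [drug for drug in drug_list_lower if drug in found]
-- ===== Notes on version B (the rewrite author's own statement) =====
-- stated objective: alternative
-- what changed: A builds a case-preserving deduplicated name list, lowers it into a second list, then scans all names once per drug; B makes a single pass over the raw records, lowering each name in place and marking matched drugs in a set (skipping already-found drugs), then emits drug_list_lower filtered by that set - no dedup pass and no intermediate name lists.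
import Mathlib
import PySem

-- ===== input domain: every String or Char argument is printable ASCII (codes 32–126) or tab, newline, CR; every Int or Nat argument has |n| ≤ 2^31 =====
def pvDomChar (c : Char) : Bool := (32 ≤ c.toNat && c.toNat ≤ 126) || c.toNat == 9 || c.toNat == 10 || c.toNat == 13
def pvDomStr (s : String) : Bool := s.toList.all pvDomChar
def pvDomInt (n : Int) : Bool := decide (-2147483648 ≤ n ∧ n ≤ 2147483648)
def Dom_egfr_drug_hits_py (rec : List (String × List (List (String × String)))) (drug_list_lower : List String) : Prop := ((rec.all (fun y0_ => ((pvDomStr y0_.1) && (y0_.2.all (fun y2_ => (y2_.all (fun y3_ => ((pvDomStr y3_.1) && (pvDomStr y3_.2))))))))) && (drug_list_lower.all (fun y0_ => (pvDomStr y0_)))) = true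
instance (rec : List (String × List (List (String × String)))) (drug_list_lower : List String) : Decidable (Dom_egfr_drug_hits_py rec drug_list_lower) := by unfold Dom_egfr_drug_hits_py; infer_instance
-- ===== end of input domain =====

-- B: one pass over the raw records marking matched drugs in a set (no dedup pass,
-- no intermediate name lists), emitting hits in drug_list_lower order; proved equal to A.


-- ===== PORT A =====
-- _drug_names / _intervention_names: '[(d.get("name") or "") for d in record.get(key) or [] if d.get("name")]'
def pvNamesA (src : List (List (String × String))) : List String :=
  src.filterMap (fun d =>
    match PySem.Dict.get? (PySem.Dict.mk d) "name" with
    | none => none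
    | some s => if s == "" then none else some s)

-- _all_treatment_names: dedup by lowercase, keeping original case, in order
def pvAllTreatmentNames (rec : List (String × List (List (String × String)))) : List String :=
  ((pvNamesA (PySem.Dict.getD (PySem.Dict.mk rec) "drugs" []) ++
    pvNamesA (PySem.Dict.getD (PySem.Dict.mk rec) "interventions" [])).foldl
    (fun (st : PySem.Set String × List String) name =>
      let low := PySem.Str.lower name
      if !(low == "") && !(PySem.Set.contains st.1 low)
      then (PySem.Set.add st.1 low, st.2 ++ [name])
      else st)
    (PySem.Set.empty, [])).2

def egfr_drug_hits_py (rec : List (String × List (List (String × String)))) (drug_list_lower : List String) : List String :=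
  let names := (pvAllTreatmentNames rec).map PySem.Str.lower
  drug_list_lower.foldl
    (fun hits drug => if names.any (fun n => PySem.Str.isIn drug n) then hits ++ [drug] else hits)
    []

-- ===== PORT B =====
def egfr_drug_hits_py_alt (rec : List (String × List (List (String × String)))) (drug_list_lower : List String) : List String :=
  let found :=
    [PySem.Dict.getD (PySem.Dict.mk rec) "drugs" [],
     PySem.Dict.getD (PySem.Dict.mk rec) "interventions" []].foldl
      (fun fd src =>
        src.foldl
          (fun fd d =>
            match PySem.Dict.get? (PySem.Dict.mk d) "name" with
            | none => fd
            | some name =>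
              if name == "" then fd
              else
                let low := PySem.Str.lower name
                drug_list_lower.foldl
                  (fun fd drug =>
                    if !(PySem.Set.contains fd drug) && PySem.Str.isIn drug low
                    then PySem.Set.add fd drug else fd)
                  fd)
          fd)
      PySem.Set.empty
  drug_list_lower.filter (fun drug => PySem.Set.contains found drug)

-- ===== PRECONDITION & SPEC =====
def Spec_egfr_drug_hits_py (rec : List (String × List (List (String × String)))) (drug_list_lower : List String) (out : List String) : Prop := out = egfr_drug_hits_py_alt rec drug_list_lower
instance (rec : List (String × List (List (String × String)))) (drug_list_lower : List String) (out : List String) : Decidable (Spec_egfr_drug_hits_py rec drug_list_lower out) := by unfold Spec_egfr_drug_hits_py; infer_instance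

-- ===== CLAIM (what is proved, stated in full; the proofs are below) =====
def Claim_equal_egfr_drug_hits_py : Prop := ∀ (rec : List (String × List (List (String × String)))) (drug_list_lower : List String), Dom_egfr_drug_hits_py rec drug_list_lower → Spec_egfr_drug_hits_py rec drug_list_lower (egfr_drug_hits_py rec drug_list_lower)

-- ===== LEMMAS AND PROOFS =====

-- every name produced by pvNamesA is nonempty
lemma pvNamesA_ne_empty (src : List (List (String × String))) :
    ∀ n ∈ pvNamesA src, n ≠ "" := by
  intro n hn
  simp only [pvNamesA, List.mem_filterMap] at hn
  obtain ⟨d, -, hd⟩ := hn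
  split at hd
  · simp at hd
  · split at hd
    · simp at hd
    · next hs => cases hd; simpa using hs

-- lowering a nonempty string gives a nonempty string
lemma lower_ne_empty (s : String) (h : s ≠ "") : PySem.Str.lower s ≠ "" := by
  intro he
  apply h
  rw [← String.toList_eq_nil_iff] at he ⊢
  rw [PySem.Str.toList_lower] at he
  simpa [PySem.Chars.lower] using he

-- B inner loop: membership in the set after scanning all drugs against one lowered name
lemma alt_inner_mem (dl : List String) (low : String) (fd : PySem.Set String) (drug : String) :
    drug ∈ dl.foldl
      (fun fd drug =>
        if !(PySem.Set.contains fd drug) && PySem.Str.isIn drug low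
        then PySem.Set.add fd drug else fd) fd
    ↔ drug ∈ fd ∨ (drug ∈ dl ∧ PySem.Str.isIn drug low = true) := by
  induction dl generalizing fd with
  | nil => simp
  | cons x xs ih =>
    simp only [List.foldl_cons]
    by_cases hc : PySem.Set.contains fd x = true
    · rw [if_neg (by rw [hc]; exact Bool.false_ne_true), ih]
      have hx : x ∈ fd := (PySem.Set.contains_iff fd x).1 hc
      simp only [List.mem_cons]
      constructor
      · rintro (h | ⟨h, hi⟩)
        · exact Or.inl h
        · exact Or.inr ⟨Or.inr h, hi⟩
      · rintro (h | ⟨rfl | h, hi⟩)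
        · exact Or.inl h
        · exact Or.inl hx
        · exact Or.inr ⟨h, hi⟩
    · replace hc : PySem.Set.contains fd x = false := by simpa using hc
      by_cases hi : PySem.Str.isIn x low = true
      · rw [if_pos (by rw [hc, hi]; rfl), ih]
        simp only [List.mem_cons, PySem.Set.mem_add]
        constructor
        · rintro ((h | rfl) | ⟨h, hii⟩)
          · exact Or.inl h
          · exact Or.inr ⟨Or.inl rfl, hi⟩
          · exact Or.inr ⟨Or.inr h, hii⟩
        · rintro (h | ⟨hd, hii⟩)
          · exact Or.inl (Or.inl h)
          · rcases hd with rfl | h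
            · exact Or.inl (Or.inr rfl)
            · exact Or.inr ⟨h, hii⟩
      · replace hi : PySem.Str.isIn x low = false := by simpa using hi
        rw [if_neg (by rw [hi, Bool.and_false]; exact Bool.false_ne_true), ih]
        simp only [List.mem_cons]
        constructor
        · rintro (h | ⟨h, hii⟩)
          · exact Or.inl h
          · exact Or.inr ⟨Or.inr h, hii⟩
        · rintro (h | ⟨rfl | h, hii⟩)
          · exact Or.inl h
          · rw [hii] at hi; cases hi
          · exact Or.inr ⟨h, hii⟩

-- B middle loop: scanning one source of record-dicts
lemma alt_src_mem (dl : List String) (src : List (List (String × String))) (fd : PySem.Set String) (drug : String) :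
    drug ∈ src.foldl
      (fun fd d =>
        match PySem.Dict.get? (PySem.Dict.mk d) "name" with
        | none => fd
        | some name =>
          if name == "" then fd
          else
            dl.foldl
              (fun fd drug =>
                if !(PySem.Set.contains fd drug) && PySem.Str.isIn drug (PySem.Str.lower name)
                then PySem.Set.add fd drug else fd)
              fd) fd
    ↔ drug ∈ fd ∨ (drug ∈ dl ∧ ∃ n ∈ pvNamesA src, PySem.Str.isIn drug (PySem.Str.lower n) = true) := by
  induction src generalizing fd with
  | nil => simp [pvNamesA]
  | cons d ds ih =>
    simp only [List.foldl_cons]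
    cases hg : PySem.Dict.get? (PySem.Dict.mk d) "name" with
    | none =>
      have hns : pvNamesA (d :: ds) = pvNamesA ds := by simp [pvNamesA, hg]
      rw [ih, hns]
    | some s =>
      by_cases hs : s = ""
      · subst hs
        have hns : pvNamesA (d :: ds) = pvNamesA ds := by simp [pvNamesA, hg]
        have hred : (match some "" with
            | none => fd
            | some name =>
              if name == "" then fd
              else
                dl.foldl
                  (fun fd drug =>
                    if !(PySem.Set.contains fd drug) && PySem.Str.isIn drug (PySem.Str.lower name)
                    then PySem.Set.add fd drug else fd)
                  fd) = fd := by rfl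
        rw [hred, ih, hns]
      · have hns : pvNamesA (d :: ds) = s :: pvNamesA ds := by simp [pvNamesA, hg, hs]
        have hmatch : (match some s with
            | none => fd
            | some name =>
              if name == "" then fd
              else
                dl.foldl
                  (fun fd drug =>
                    if !(PySem.Set.contains fd drug) && PySem.Str.isIn drug (PySem.Str.lower name)
                    then PySem.Set.add fd drug else fd)
                  fd) =
            dl.foldl
              (fun fd drug =>
                if !(PySem.Set.contains fd drug) && PySem.Str.isIn drug (PySem.Str.lower s)
                then PySem.Set.add fd drug else fd)
              fd := by
          show (if s == "" then fd else _) = _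
          rw [if_neg (by simp [hs])]
        rw [hmatch, ih, alt_inner_mem, hns]
        simp only [List.mem_cons]
        constructor
        · rintro ((h | ⟨hd, hi⟩) | ⟨hd, n, hn, hi⟩)
          · exact Or.inl h
          · exact Or.inr ⟨hd, s, Or.inl rfl, hi⟩
          · exact Or.inr ⟨hd, n, Or.inr hn, hi⟩
        · rintro (h | ⟨hd, n, hn, hi⟩)
          · exact Or.inl (Or.inl h)
          · rcases hn with rfl | hn
            · exact Or.inl (Or.inr ⟨hd, hi⟩)
            · exact Or.inr ⟨hd, n, hn, hi⟩

-- A dedup loop: lowered membership in the accumulated list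
lemma aloop_mem (names : List String) (st : PySem.Set String × List String)
    (hinv : ∀ x, PySem.Set.contains st.1 x = true ↔ x ∈ st.2.map PySem.Str.lower) (low : String) :
    low ∈ (names.foldl
      (fun (st : PySem.Set String × List String) name =>
        let l := PySem.Str.lower name
        if !(l == "") && !(PySem.Set.contains st.1 l)
        then (PySem.Set.add st.1 l, st.2 ++ [name])
        else st) st).2.map PySem.Str.lower
    ↔ low ∈ st.2.map PySem.Str.lower ∨ (low ≠ "" ∧ ∃ n ∈ names, PySem.Str.lower n = low) := by
  induction names generalizing st with
  | nil => simp
  | cons n ns ih =>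
    simp only [List.foldl_cons]
    by_cases he : PySem.Str.lower n == ""
    · have he' : PySem.Str.lower n = "" := by simpa using he
      rw [if_neg (by rw [he, Bool.not_true, Bool.false_and]; exact Bool.false_ne_true)]
      rw [ih st hinv]
      constructor
      · rintro (h | ⟨hne, m, hm, hl⟩)
        · exact Or.inl h
        · exact Or.inr ⟨hne, m, List.mem_cons_of_mem n hm, hl⟩
      · rintro (h | ⟨hne, m, hm, hl⟩)
        · exact Or.inl h
        · rcases List.mem_cons.1 hm with rfl | hm'
          · exact (hne (hl.symm.trans he')).elim
          · exact Or.inr ⟨hne, m, hm', hl⟩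
    · have he' : PySem.Str.lower n ≠ "" := by simpa using he
      have he2 : (PySem.Str.lower n == "") = false := by simpa using he
      by_cases hc : PySem.Set.contains st.1 (PySem.Str.lower n) = true
      · rw [if_neg (by rw [hc, Bool.not_true, Bool.and_false]; exact Bool.false_ne_true)]
        rw [ih st hinv]
        have hmem : PySem.Str.lower n ∈ st.2.map PySem.Str.lower := (hinv _).1 hc
        constructor
        · rintro (h | ⟨hne, m, hm, hl⟩)
          · exact Or.inl h
          · exact Or.inr ⟨hne, m, List.mem_cons_of_mem n hm, hl⟩
        · rintro (h | ⟨hne, m, hm, hl⟩)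
          · exact Or.inl h
          · rcases List.mem_cons.1 hm with rfl | hm'
            · exact Or.inl (hl ▸ hmem)
            · exact Or.inr ⟨hne, m, hm', hl⟩
      · replace hc : PySem.Set.contains st.1 (PySem.Str.lower n) = false := by simpa using hc
        rw [if_pos (by rw [he2, hc, Bool.not_false, Bool.and_self])]
        have hinv' : ∀ x, PySem.Set.contains (PySem.Set.add st.1 (PySem.Str.lower n)) x = true ↔
            x ∈ ((st.2 ++ [n]).map PySem.Str.lower) := by
          intro x
          rw [PySem.Set.contains_iff, PySem.Set.mem_add, ← PySem.Set.contains_iff st.1 x, hinv x]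
          simp [List.mem_append]
        rw [ih _ hinv']
        have hsplit : ∀ y, y ∈ ((st.2 ++ [n]).map PySem.Str.lower) ↔
            y ∈ st.2.map PySem.Str.lower ∨ y = PySem.Str.lower n := by
          intro y; simp [List.mem_append]
        rw [hsplit]
        constructor
        · rintro ((h | rfl) | ⟨hne, m, hm, hl⟩)
          · exact Or.inl h
          · exact Or.inr ⟨he', n, List.mem_cons_self, rfl⟩
          · exact Or.inr ⟨hne, m, List.mem_cons_of_mem n hm, hl⟩
        · rintro (h | ⟨hne, m, hm, hl⟩)
          · exact Or.inl (Or.inl h)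
          · rcases List.mem_cons.1 hm with rfl | hm'
            · exact Or.inl (Or.inr hl.symm)
            · exact Or.inr ⟨hne, m, hm', hl⟩

-- characterization of A's lowered deduplicated name list
lemma allTreatmentNames_mem (rec : List (String × List (List (String × String)))) (low : String) :
    low ∈ (pvAllTreatmentNames rec).map PySem.Str.lower ↔
      low ≠ "" ∧ ∃ n ∈ pvNamesA (PySem.Dict.getD (PySem.Dict.mk rec) "drugs" []) ++
        pvNamesA (PySem.Dict.getD (PySem.Dict.mk rec) "interventions" []),
        PySem.Str.lower n = low := by
  unfold pvAllTreatmentNames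
  rw [aloop_mem _ _ (by intro x; simp [PySem.Set.empty])]
  simp

-- ===== VERDICT (by name: the statement is the Claim_ definition above) =====
-- the two hit predicates agree for every drug
lemma hit_pred_eq (rec : List (String × List (List (String × String)))) (dl : List String)
    (drug : String) (hdl : drug ∈ dl) :
    ((pvAllTreatmentNames rec).map PySem.Str.lower).any (fun n => PySem.Str.isIn drug n) =
    PySem.Set.contains
      ([PySem.Dict.getD (PySem.Dict.mk rec) "drugs" [],
        PySem.Dict.getD (PySem.Dict.mk rec) "interventions" []].foldl
        (fun fd src =>
          src.foldl
            (fun fd d =>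
              match PySem.Dict.get? (PySem.Dict.mk d) "name" with
              | none => fd
              | some name =>
                if name == "" then fd
                else
                  dl.foldl
                    (fun fd drug =>
                      if !(PySem.Set.contains fd drug) && PySem.Str.isIn drug (PySem.Str.lower name)
                      then PySem.Set.add fd drug else fd)
                    fd)
            fd)
        PySem.Set.empty) drug := by
  set s1 := pvNamesA (PySem.Dict.getD (PySem.Dict.mk rec) "drugs" []) with hs1
  set s2 := pvNamesA (PySem.Dict.getD (PySem.Dict.mk rec) "interventions" []) with hs2
  have hL : (((pvAllTreatmentNames rec).map PySem.Str.lower).any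
      (fun n => PySem.Str.isIn drug n) = true) ↔
      ∃ n ∈ s1 ++ s2, PySem.Str.isIn drug (PySem.Str.lower n) = true := by
    rw [List.any_eq_true]
    constructor
    · rintro ⟨low, hlow, hi⟩
      obtain ⟨-, n, hn, rfl⟩ := (allTreatmentNames_mem rec low).1 hlow
      exact ⟨n, hn, hi⟩
    · rintro ⟨n, hn, hi⟩
      have hne : n ≠ "" := by
        rcases List.mem_append.1 hn with h | h
        · exact pvNamesA_ne_empty _ n (hs1 ▸ h)
        · exact pvNamesA_ne_empty _ n (hs2 ▸ h)
      exact ⟨PySem.Str.lower n,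
        (allTreatmentNames_mem rec _).2 ⟨lower_ne_empty n hne, n, hn, rfl⟩, hi⟩
  have hR : (PySem.Set.contains
      ([PySem.Dict.getD (PySem.Dict.mk rec) "drugs" [],
        PySem.Dict.getD (PySem.Dict.mk rec) "interventions" []].foldl
        (fun fd src =>
          src.foldl
            (fun fd d =>
              match PySem.Dict.get? (PySem.Dict.mk d) "name" with
              | none => fd
              | some name =>
                if name == "" then fd
                else
                  dl.foldl
                    (fun fd drug =>
                      if !(PySem.Set.contains fd drug) && PySem.Str.isIn drug (PySem.Str.lower name)
                      then PySem.Set.add fd drug else fd)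
                    fd)
            fd)
        PySem.Set.empty) drug = true) ↔
      ∃ n ∈ s1 ++ s2, PySem.Str.isIn drug (PySem.Str.lower n) = true := by
    rw [PySem.Set.contains_iff]
    simp only [List.foldl_cons, List.foldl_nil]
    rw [alt_src_mem, alt_src_mem]
    have : drug ∉ (PySem.Set.empty : PySem.Set String) := by simp [PySem.Set.empty]
    simp only [List.mem_append]
    constructor
    · rintro ((h | ⟨-, n, hn, hi⟩) | ⟨-, n, hn, hi⟩)
      · exact absurd h this
      · exact ⟨n, Or.inl hn, hi⟩
      · exact ⟨n, Or.inr hn, hi⟩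
    · rintro ⟨n, hn | hn, hi⟩
      · exact Or.inl (Or.inr ⟨hdl, n, hn, hi⟩)
      · exact Or.inr ⟨hdl, n, hn, hi⟩
  rw [Bool.eq_iff_iff, hL, hR]

-- ===== VERDICT (by name: the statement is the Claim_ definition above) =====
theorem egfr_drug_hits_py_spec : Claim_equal_egfr_drug_hits_py := by
  intro rec dl _
  show egfr_drug_hits_py rec dl = egfr_drug_hits_py_alt rec dl
  unfold egfr_drug_hits_py egfr_drug_hits_py_alt
  rw [PySem.List.foldl_append_if (fun drug =>
      ((pvAllTreatmentNames rec).map PySem.Str.lower).any (fun n => PySem.Str.isIn drug n))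
      (fun x => x) dl []]
  rw [List.nil_append, List.map_id']
  exact List.filter_congr (fun drug hdl => hit_pred_eq rec dl drug hdl)
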